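-- pv_equiv track=rewrite | github.com/JonathandeGier/adventofcode | solutions/2025/day2.py | is_valid_p2
-- ===== SOURCE A (Python) =====
-- def is_valid_p2(num: int) -> bool:
--     num = str(num)
--     for seq_size in range(1, (len(num) // 2) + 1):
--         if len(num) % seq_size != 0:
--             continue
--
--         segment = num[:seq_size]
--         all_same = True
--         for _start in range(0, len(num), seq_size):
--             if num[_start:_start + seq_size] != segment:
--                 all_same = False
--                 break
--
--         if all_same:
--             return False
--
--     return True
-- ===== SOURCE B (Python) =====
-- def is_valid_p2(num: int) -> bool:
--     s = str(num)
--     return s not in (s + s)[1:-1]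
-- ===== Notes on version B (the rewrite author's own statement) =====
-- stated objective: idiomatic
-- what changed: Replaced the divisor loop with block-by-block comparison by the standard string-doubling test: s is a repetition of a shorter block iff s occurs in (s+s)[1:-1].
import Mathlib
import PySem

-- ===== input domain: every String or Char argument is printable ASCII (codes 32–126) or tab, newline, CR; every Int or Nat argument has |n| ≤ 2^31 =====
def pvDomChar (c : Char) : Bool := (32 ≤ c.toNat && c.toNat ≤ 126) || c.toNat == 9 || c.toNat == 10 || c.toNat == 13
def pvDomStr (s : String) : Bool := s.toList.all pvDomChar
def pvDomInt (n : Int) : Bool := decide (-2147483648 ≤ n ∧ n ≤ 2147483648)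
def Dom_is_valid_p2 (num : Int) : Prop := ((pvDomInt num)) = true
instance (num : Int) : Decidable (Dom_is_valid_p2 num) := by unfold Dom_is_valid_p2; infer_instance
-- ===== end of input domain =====

-- B replaces A's divisor loop with the standard string-doubling repetition test (s in (s+s)[1:-1]); objective: idiomatic.


-- ===== PORT A =====
-- inner loop `for _start in range(0, len(num), seq_size)` with the early `break` (all_same = False)
def pvBlocksEq (l seg : List Char) (d : Int) : List Int → Bool
  | [] => true
  | st :: rest =>
    if PySem.List.slice l (some st) (some (st + d)) ≠ seg then false
    else pvBlocksEq l seg d rest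

-- outer loop `for seq_size in range(1, len(num)//2 + 1)` with `continue` and the early `return False`
def pvSizeLoop (l : List Char) : List Int → Bool
  | [] => true
  | d :: rest =>
    if PySem.Int.mod (l.length : Int) d ≠ 0 then pvSizeLoop l rest
    else
      if pvBlocksEq l (PySem.List.slice l none (some d)) d
          (PySem.List.pyRange 0 (l.length : Int) d) then false
      else pvSizeLoop l rest

def is_valid_p2 (num : Int) : Bool :=
  let s := PySem.Int.toChars num
  pvSizeLoop s (PySem.List.pyRange 1 (PySem.Int.floordiv (s.length : Int) 2 + 1) 1)

-- ===== PORT B =====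
def is_valid_p2_alt (num : Int) : Bool :=
  let s := PySem.Int.toChars num
  !(PySem.Chars.isIn s (PySem.List.slice (s ++ s) (some 1) (some (-1))))

-- ===== PRECONDITION & SPEC =====
def Spec_is_valid_p2 (num : Int) (out : Bool) : Prop := out = is_valid_p2_alt num
instance (num : Int) (out : Bool) : Decidable (Spec_is_valid_p2 num out) := by unfold Spec_is_valid_p2; infer_instance

-- ===== CLAIM (what is proved, stated in full; the proofs are below) =====
def Claim_equal_is_valid_p2 : Prop := ∀ (num : Int), Dom_is_valid_p2 num → Spec_is_valid_p2 num (is_valid_p2 num)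

-- ===== LEMMAS AND PROOFS =====

-- `f i` view of the string: l.getD i ' '
-- d-periodicity of l (A's "all blocks equal the first segment")
def pvPer (l : List Char) (d : Nat) : Prop := ∀ i < l.length, l.getD i ' ' = l.getD (i % d) ' '

-- rotation by k leaves l unchanged (B's "l occurs in (l++l)[1:-1]")
def pvRot (l : List Char) (k : Nat) : Prop := l.drop k ++ l.take k = l

lemma pvSizeLoop_char (l : List Char) (sizes : List Int) :
    pvSizeLoop l sizes = true ↔
      ∀ d ∈ sizes, PySem.Int.mod (l.length : Int) d = 0 →
        pvBlocksEq l (PySem.List.slice l none (some d)) d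
          (PySem.List.pyRange 0 (l.length : Int) d) = false := by
  induction sizes with
  | nil => simp [pvSizeLoop]
  | cons d rest ih =>
    by_cases hm : PySem.Int.mod (l.length : Int) d = 0
    · by_cases hb : pvBlocksEq l (PySem.List.slice l none (some d)) d
          (PySem.List.pyRange 0 (l.length : Int) d) = true
      · simp [pvSizeLoop, hm, hb]
      · simp only [Bool.not_eq_true] at hb
        simp [pvSizeLoop, hm, hb, ih]
    · simp [pvSizeLoop, hm, ih]

lemma pvBlocksEq_append (l seg : List Char) (d : Int) (xs ys : List Int) :
    pvBlocksEq l seg d (xs ++ ys) = (pvBlocksEq l seg d xs && pvBlocksEq l seg d ys) := by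
  induction xs with
  | nil => simp [pvBlocksEq]
  | cons a xs ih => by_cases h : PySem.List.slice l (some a) (some (a + d)) = seg <;>
      simp [pvBlocksEq, h, ih]

lemma pvBlocksEq_char (l seg : List Char) (d : Nat) (m : Nat) :
    pvBlocksEq l seg (d : Int) ((List.range m).map (fun q => ((d * q : Nat) : Int))) = true ↔
      ∀ q < m, (l.drop (d * q)).take d = seg := by
  induction m with
  | zero => simp [pvBlocksEq]
  | succ m ih =>
    rw [List.range_succ, List.map_append]
    rw [pvBlocksEq_append]
    have hsl : PySem.List.slice l (some ((d * m : Nat) : Int)) (some (((d * m : Nat) : Int) + (d : Int)))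
        = (l.drop (d * m)).take d := by
      exact_mod_cast PySem.List.slice_natCast_add l (d * m) d
    constructor
    · intro h q hq
      rw [Bool.and_eq_true] at h
      rcases Nat.lt_succ_iff_lt_or_eq.mp hq with h' | h'
      · exact (ih.mp h.1 q h')
      · subst h'
        have h2 := h.2
        simp only [List.map_cons, List.map_nil, pvBlocksEq] at h2
        rw [hsl] at h2
        split_ifs at h2 with hx
        · exact not_not.mp hx
    · intro h
      rw [Bool.and_eq_true]
      refine ⟨ih.mpr (fun q hq => h q (Nat.lt_succ_of_lt hq)), ?_⟩
      simp only [List.map_cons, List.map_nil, pvBlocksEq]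
      rw [hsl]
      simp [h m (Nat.lt_succ_self m)]

-- range(0, n, d) for 0 < d, d ∣ n is the list of block starts d*q, q < n/d
lemma pvRange_blocks (n d : Nat) (hd : 0 < d) (hdvd : d ∣ n) :
    PySem.List.pyRange 0 (n : Int) (d : Int) = (List.range (n / d)).map (fun q => ((d * q : Nat) : Int)) := by
  rw [PySem.List.pyRange_of_pos 0 (n : Int) (by exact_mod_cast hd)]
  obtain ⟨c, rfl⟩ := hdvd
  rcases Nat.eq_zero_or_pos c with rfl | hc
  · simp
  · have hlt : (0 : Int) < ((d * c : Nat) : Int) := by positivity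
    rw [if_pos hlt]
    have hdiv : ((((d * c : Nat) : Int) - 0 + (d : Int) - 1) / (d : Int)).toNat = d * c / d := by
      have h1 : (((d * c : Nat) : Int) - 0 + (d : Int) - 1) = ((d : Int) - 1) + (c : Int) * (d : Int) := by
        push_cast; ring
      rw [h1, Int.add_mul_ediv_right _ _ (by exact_mod_cast hd.ne')]
      rw [Int.ediv_eq_zero_of_lt (by omega) (by omega)]
      simp [Nat.mul_div_cancel_left c hd]
    rw [hdiv]
    apply List.map_congr_left
    intro k _
    push_cast; ring

-- block equality ↔ d-periodicity, for d ∣ n, 0 < d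
lemma pvBlocks_iff_per (l : List Char) (d : Nat) (hd : 0 < d) (hdvd : d ∣ l.length) :
    (∀ q < l.length / d, (l.drop (d * q)).take d = l.take d) ↔ pvPer l d := by
  have hblk : ∀ q, q < l.length / d → d * q + d ≤ l.length := by
    intro q h
    have h2 : d * (q + 1) ≤ d * (l.length / d) := Nat.mul_le_mul_left d (Nat.succ_le_of_lt h)
    have h3 : d * (l.length / d) ≤ l.length := Nat.mul_div_le l.length d
    have h4 : d * (q + 1) = d * q + d := by ring
    omega
  constructor
  · intro hB i hi
    have hq : i / d < l.length / d := Nat.div_lt_div_of_lt_of_dvd hdvd hi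
    have hle := hblk _ hq
    have hr : i % d < d := Nat.mod_lt i hd
    have heq := hB (i / d) hq
    have hpt : ((l.drop (d * (i / d))).take d)[i % d]'(by simp; omega)
        = (l.take d)[i % d]'(by simp [hr]; omega) := by
      simp only [heq]
    have hL : ((l.drop (d * (i / d))).take d)[i % d]'(by simp; omega)
        = l[d * (i / d) + i % d]'(by omega) := by
      simp [List.getElem_take, List.getElem_drop]
    have hR : (l.take d)[i % d]'(by simp [hr]; omega) = l[i % d]'(by omega) := by
      simp [List.getElem_take]
    have hdm : d * (i / d) + i % d = i := Nat.div_add_mod i d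
    rw [hL, hR] at hpt
    rw [List.getD_eq_getElem l ' ' hi, List.getD_eq_getElem l ' ' (by omega : i % d < l.length)]
    rw [← hpt]
    congr 1
    omega
  · intro hp q hq
    have hle := hblk _ hq
    apply List.ext_getElem
    · simp; omega
    · intro r h1 h2
      have hr : r < d := by simp at h2; omega
      have hL : ((l.drop (d * q)).take d)[r]'h1 = l[d * q + r]'(by omega) := by
        simp [List.getElem_take, List.getElem_drop]
      have hR : (l.take d)[r]'h2 = l[r]'(by omega) := by
        simp [List.getElem_take]
      rw [hL, hR]
      have p1 := hp (d * q + r) (by omega)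
      have p2 : (d * q + r) % d = r := by
        rw [Nat.mul_comm, Nat.add_comm, Nat.add_mul_mod_self_right]
        exact Nat.mod_eq_of_lt hr
      rw [p2] at p1
      rw [List.getD_eq_getElem l ' ' (by omega : d * q + r < l.length),
          List.getD_eq_getElem l ' ' (by omega : r < l.length)] at p1
      exact p1

-- ===== B-side: the slice and the infix characterisation =====
lemma pvSlice_mid (l : List Char) (h : l ≠ []) :
    PySem.List.slice (l ++ l) (some 1) (some (-1))
      = ((l ++ l).drop 1).take (2 * l.length - 2) := by
  have hn : 1 ≤ l.length := List.length_pos_iff.mpr h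
  simp [PySem.List.slice, PySem.List.clampIdx]
  rw [if_neg (by omega)]
  rw [show min 1 (l.length + l.length) = 1 by omega]
  rw [List.drop_one]
  congr 1
  omega

lemma pvRot_window (l : List Char) (k : Nat) (hk : k ≤ l.length) :
    ((l ++ l).drop k).take l.length = l.drop k ++ l.take k := by
  rw [List.drop_append_of_le_length hk, List.take_append]
  rw [List.take_of_length_le (by simp)]
  congr 2
  simp
  omega

lemma pvIsIn_iff (l : List Char) (h : l ≠ []) :
    PySem.Chars.isIn l (PySem.List.slice (l ++ l) (some 1) (some (-1))) = true ↔
      ∃ k, 1 ≤ k ∧ k ≤ l.length - 1 ∧ pvRot l k := by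
  have hn : 1 ≤ l.length := List.length_pos_iff.mpr h
  rw [pvSlice_mid l h, ← PySem.Chars.exists_prefix_drop_iff_isIn]
  constructor
  · rintro ⟨j, hpre⟩
    rw [List.drop_take, List.drop_drop] at hpre
    have hlen := hpre.length_le
    simp at hlen
    have hj : j + 1 ≤ l.length - 1 := by omega
    refine ⟨j + 1, by omega, hj, ?_⟩
    have hl := List.prefix_iff_eq_take.mp hpre
    rw [List.take_take] at hl
    rw [show min l.length (2 * l.length - 2 - j) = l.length by omega] at hl
    unfold pvRot
    rw [← pvRot_window l (j + 1) (by omega)]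
    rw [show j + 1 = 1 + j by omega]
    exact hl.symm
  · rintro ⟨k, hk1, hk2, hrot⟩
    refine ⟨k - 1, ?_⟩
    rw [List.drop_take, List.drop_drop]
    rw [show 1 + (k - 1) = k by omega]
    rw [List.prefix_iff_eq_take]
    rw [List.take_take]
    rw [show min l.length (2 * l.length - 2 - (k - 1)) = l.length by omega]
    rw [pvRot_window l k (by omega)]
    exact hrot.symm

-- ===== the number-theoretic core: rotation ↔ proper-divisor periodicity =====
lemma pvGetD_congr (l : List Char) (x y : Nat) (hx : x < l.length) (hy : y < l.length)
    (h : l.getD x ' ' = l.getD y ' ') : l[x]'hx = l[y]'hy := by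
  rwa [List.getD_eq_getElem l ' ' hx, List.getD_eq_getElem l ' ' hy] at h

lemma pvRot_of_per (l : List Char) (d : Nat) (hd : 1 ≤ d) (hle : d ≤ l.length / 2)
    (hdvd : d ∣ l.length) (hper : pvPer l d) : pvRot l d := by
  have hdn : d ≤ l.length := by
    obtain ⟨c, hc⟩ := hdvd
    rcases Nat.eq_zero_or_pos c with rfl | hc1
    · omega
    · nlinarith
  unfold pvRot
  apply List.ext_getElem
  · simp; omega
  · intro i h1 h2
    rw [List.getElem_append]
    split
    · next hcase =>
      simp only [List.length_drop] at hcase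
      rw [List.getElem_drop]
      apply pvGetD_congr
      have e1 := hper (d + i) (by omega)
      have e2 := hper i (by omega)
      have e3 : (d + i) % d = i % d := by
        rw [Nat.add_comm, Nat.add_mod_right]
      rw [e1, e2, e3]
    · next hcase =>
      simp only [List.length_drop, Nat.not_lt] at hcase
      rw [List.getElem_take]
      apply pvGetD_congr
      simp only [List.length_drop]
      obtain ⟨c, hc⟩ := hdvd
      have hc2 : 1 ≤ c := by nlinarith
      have e1 := hper i h2
      have e2 := hper (i - (l.length - d)) (by omega)
      have e3 : (i - (l.length - d)) % d = i % d := by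
        have hi : i = (i - (l.length - d)) + d * (c - 1) := by
          have : d * (c - 1) = d * c - d := by
            cases c with
            | zero => omega
            | succ c' => simp [Nat.mul_succ]
          omega
        conv_rhs => rw [hi]
        rw [Nat.add_mul_mod_self_left]
      rw [e1, e2, e3]

lemma pvPer_gcd_of_rot (l : List Char) (k : Nat) (hk1 : 1 ≤ k) (hk2 : k ≤ l.length - 1)
    (hrot : pvRot l k) : pvPer l (Nat.gcd k l.length) := by
  set n := l.length with hn
  have hkn : k < n := by
    rcases Nat.eq_zero_or_pos n with h0 | h0
    · exfalso; omega
    · omega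
  have hn0 : 0 < n := by omega
  have H : ∀ i < n, l.getD ((i + k) % n) ' ' = l.getD i ' ' := by
    intro i hi
    conv_rhs => rw [show l.getD i ' ' = (l.drop k ++ l.take k).getD i ' ' by rw [hrot]]
    rw [List.getD_eq_getElem l ' ' (by exact Nat.mod_lt _ hn0),
        List.getD_eq_getElem _ ' ' (by simp; omega)]
    rw [List.getElem_append]
    split
    · next hcase =>
      simp only [List.length_drop] at hcase
      rw [List.getElem_drop]
      congr 1
      have : (i + k) % n = i + k := Nat.mod_eq_of_lt (by omega)
      omega
    · next hcase =>
      simp only [List.length_drop, Nat.not_lt] at hcase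
      rw [List.getElem_take]
      congr 1
      simp only [List.length_drop]
      have : (i + k) % n = i + k - n := by
        rw [Nat.mod_eq_sub_mod (by omega)]
        exact Nat.mod_eq_of_lt (by omega)
      omega
  have Hm : ∀ m : ℕ, ∀ i < n, l.getD ((i + m * k) % n) ' ' = l.getD i ' ' := by
    intro m
    induction m with
    | zero => intro i hi; simp [Nat.mod_eq_of_lt hi]
    | succ m ih =>
      intro i hi
      have e : (i + (m + 1) * k) % n = ((i + m * k) % n + k) % n := by
        rw [Nat.mod_add_mod]
        congr 1
        ring
      rw [e, H ((i + m * k) % n) (Nat.mod_lt _ hn0), ih i hi]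
  set g := Nat.gcd k n with hg
  obtain ⟨m, hm⟩ : ∃ m : ℕ, (m * k) % n = g % n := by
    set a := Nat.gcdA k n with ha
    refine ⟨(a % (n : ℤ)).toNat, ?_⟩
    have hnz : ((n : ℤ)) ≠ 0 := by exact_mod_cast hn0.ne'
    have hcast : (((a % (n : ℤ)).toNat : ℤ)) = a % n := Int.toNat_of_nonneg (Int.emod_nonneg a hnz)
    have hbez : (g : ℤ) = (k : ℤ) * a + (n : ℤ) * Nat.gcdB k n := Nat.gcd_eq_gcd_ab k n
    have hint : (((a % (n : ℤ)).toNat * k : ℕ) : ℤ) % n = (g : ℤ) % n := by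
      push_cast
      rw [Int.mul_emod, hcast, Int.emod_emod_of_dvd _ (dvd_refl _)]
      rw [← Int.mul_emod]
      have hswap : a * (k : ℤ) = (g : ℤ) - (n : ℤ) * Nat.gcdB k n := by rw [hbez]; ring
      rw [hswap]
      simp [Int.sub_emod, Int.mul_emod_right]
    rw [← Int.natCast_emod, ← Int.natCast_emod] at hint
    exact_mod_cast hint
  have Hg : ∀ j < n, l.getD ((j + g) % n) ' ' = l.getD j ' ' := by
    intro j hj
    have e : (j + g) % n = (j + m * k) % n := by
      conv_lhs => rw [Nat.add_mod]
      conv_rhs => rw [Nat.add_mod]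
      rw [hm]
    rw [e, Hm m j hj]
  have hg0 : 0 < g := Nat.gcd_pos_of_pos_left n hk1
  intro i
  induction i using Nat.strong_induction_on with
  | _ i ih =>
    intro hi
    by_cases hcase : i < g
    · rw [Nat.mod_eq_of_lt hcase]
    · have step : l.getD i ' ' = l.getD (i - g) ' ' := by
        have hs := Hg (i - g) (by omega)
        rw [Nat.sub_add_cancel (by omega), Nat.mod_eq_of_lt hi] at hs
        exact hs
      rw [step, ih (i - g) (by omega) (by omega)]
      congr 1
      conv_rhs => rw [show i = (i - g) + g by omega]
      rw [Nat.add_mod_right]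

lemma pvCore (l : List Char) (h : l ≠ []) :
    (∃ k, 1 ≤ k ∧ k ≤ l.length - 1 ∧ pvRot l k) ↔
      (∃ d, 1 ≤ d ∧ d ≤ l.length / 2 ∧ d ∣ l.length ∧ pvPer l d) := by
  have hn1 : 1 ≤ l.length := List.length_pos_iff.mpr h
  constructor
  · rintro ⟨k, h1, h2, hrot⟩
    have hper := pvPer_gcd_of_rot l k h1 h2 hrot
    set g := Nat.gcd k l.length with hg
    have hg0 : 0 < g := Nat.gcd_pos_of_pos_left _ h1
    have hgk : g ≤ k := Nat.le_of_dvd h1 (Nat.gcd_dvd_left k _)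
    have hgn : g ∣ l.length := Nat.gcd_dvd_right k _
    refine ⟨g, hg0, ?_, hgn, hper⟩
    obtain ⟨c, hc⟩ := hgn
    have hkn : k < l.length := by omega
    have hc2 : 2 ≤ c := by
      rcases Nat.lt_or_ge c 2 with hlt | hge
      · exfalso; interval_cases c <;> omega
      · exact hge
    rw [Nat.le_div_iff_mul_le (by norm_num)]
    nlinarith
  · rintro ⟨d, h1, h2, hdvd, hper⟩
    exact ⟨d, h1, by omega, pvRot_of_per l d h1 h2 hdvd hper⟩

lemma pvKey (l : List Char) (h : l ≠ []) :
    pvSizeLoop l (PySem.List.pyRange 1 (PySem.Int.floordiv (l.length : Int) 2 + 1) 1)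
      = !(PySem.Chars.isIn l (PySem.List.slice (l ++ l) (some 1) (some (-1)))) := by
  have hn1 : 1 ≤ l.length := List.length_pos_iff.mpr h
  have hfd : PySem.Int.floordiv ((l.length : Nat) : Int) 2 = ((l.length / 2 : Nat) : Int) := by
    exact_mod_cast PySem.Int.floordiv_natCast l.length 2
  have hA : pvSizeLoop l (PySem.List.pyRange 1 (PySem.Int.floordiv (l.length : Int) 2 + 1) 1) = true ↔
      ¬ ∃ d, 1 ≤ d ∧ d ≤ l.length / 2 ∧ d ∣ l.length ∧ pvPer l d := by
    rw [pvSizeLoop_char]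
    constructor
    · rintro hall ⟨d, h1, h2, hdvd, hper⟩
      have hmem : ((d : Nat) : Int) ∈ PySem.List.pyRange 1 (PySem.Int.floordiv (l.length : Int) 2 + 1) 1 := by
        rw [PySem.List.mem_pyRange_one, hfd]
        constructor
        · exact_mod_cast h1
        · have : (d : Int) ≤ ((l.length / 2 : Nat) : Int) := by exact_mod_cast h2
          omega
      have hmod : PySem.Int.mod (l.length : Int) ((d : Nat) : Int) = 0 :=
        (PySem.Int.mod_eq_zero_iff_dvd _ _).mpr (Int.natCast_dvd_natCast.mpr hdvd)
      have hfalse := hall _ hmem hmod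
      rw [PySem.List.slice_to_natCast, pvRange_blocks l.length d h1 hdvd] at hfalse
      have htrue := (pvBlocksEq_char l (l.take d) d (l.length / d)).mpr
        ((pvBlocks_iff_per l d h1 hdvd).mpr hper)
      rw [htrue] at hfalse
      cases hfalse
    · intro hnE d hmem hmod
      rw [PySem.List.mem_pyRange_one, hfd] at hmem
      obtain ⟨h1, h2⟩ := hmem
      lift d to Nat using (by omega) with d'
      have hdvd : d' ∣ l.length := by
        rw [PySem.Int.mod_eq_zero_iff_dvd, Int.natCast_dvd_natCast] at hmod
        exact hmod
      have hd1 : 1 ≤ d' := by exact_mod_cast h1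
      have hd2 : d' ≤ l.length / 2 := by
        have : (d' : Int) ≤ ((l.length / 2 : Nat) : Int) := by omega
        exact_mod_cast this
      rw [PySem.List.slice_to_natCast, pvRange_blocks l.length d' hd1 hdvd]
      by_contra hne
      rw [Bool.not_eq_false] at hne
      exact hnE ⟨d', hd1, hd2, hdvd,
        (pvBlocks_iff_per l d' hd1 hdvd).mp ((pvBlocksEq_char l (l.take d') d' (l.length / d')).mp hne)⟩
  have hB := pvIsIn_iff l h
  rw [pvCore l h] at hB
  by_cases hII : PySem.Chars.isIn l (PySem.List.slice (l ++ l) (some 1) (some (-1))) = true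
  · rw [hII, Bool.not_true]
    exact Bool.eq_false_iff.mpr (fun hT => (hA.mp hT) (hB.mp hII))
  · rw [Bool.eq_false_iff.mpr hII, Bool.not_false]
    exact hA.mpr (fun hE => hII (hB.mpr hE))

lemma pvToChars_ne_nil (num : Int) : PySem.Int.toChars num ≠ [] := by
  unfold PySem.Int.toChars
  split
  · simp
  · have := Nat.length_toDigits_pos (b := 10) (n := num.toNat)
    intro hx; rw [hx] at this; simp at this

-- ===== VERDICT (by name: the statement is the Claim_ definition above) =====
theorem is_valid_p2_spec : Claim_equal_is_valid_p2 := by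
  intro num _
  unfold Spec_is_valid_p2 is_valid_p2 is_valid_p2_alt
  exact pvKey (PySem.Int.toChars num) (pvToChars_ne_nil num)
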